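-- pv_equiv track=rewrite | github.com/0choki0/algo | 프로그래머스/0/181883. 수열과 구간 쿼리 1/수열과 구간 쿼리 1.py | solution
-- ===== SOURCE A (Python) =====
-- def solution(arr, queries):
--     my_dict = {}
--     for i in range(len(arr)):
--         my_dict[i] = 0
--     for query in queries:
--         for i in range(query[0],query[1]+1):
--             my_dict[i] += 1
--     answer = []
--     temp = 0
--     for i in arr:
--         answer.append(i+my_dict[temp])
--         temp += 1
--     return answer
-- ===== SOURCE B (Python) =====
-- def solution(arr, queries):
--     n = len(arr)
--     diff = [0] * (n + 1)
--     for q in queries: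
--         l, r = q[0], q[1]
--         if l <= r:
--             diff[l] += 1
--             diff[r + 1] -= 1
--     run = 0
--     answer = []
--     for x, d in zip(arr, diff):
--         run += d
--         answer.append(x + run)
--     return answer
-- ===== Notes on version B (the rewrite author's own statement) =====
-- stated objective: faster
-- what changed: Replaces the per-query walk over every index in [l,r] (dict of counters, O(sum of range lengths)) by a difference array with a running prefix sum, O(n+q).
import Mathlib
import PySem

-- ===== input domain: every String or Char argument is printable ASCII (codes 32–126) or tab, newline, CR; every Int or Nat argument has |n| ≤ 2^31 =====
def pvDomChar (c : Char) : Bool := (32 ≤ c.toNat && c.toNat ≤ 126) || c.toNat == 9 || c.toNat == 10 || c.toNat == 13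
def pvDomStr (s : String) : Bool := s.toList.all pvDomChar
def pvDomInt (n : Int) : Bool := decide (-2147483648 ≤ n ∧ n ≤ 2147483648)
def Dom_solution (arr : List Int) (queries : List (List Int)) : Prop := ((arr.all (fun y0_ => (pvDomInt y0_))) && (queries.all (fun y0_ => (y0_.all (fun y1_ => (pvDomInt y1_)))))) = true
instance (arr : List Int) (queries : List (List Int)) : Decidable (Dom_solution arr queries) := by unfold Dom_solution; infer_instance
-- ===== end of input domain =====

-- B replaces A's per-query walk over every index of [l, r] (a dict of counters) by a
-- difference array with a running prefix sum; objective: faster (O(n+q) instead of O(n*q)).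


-- ===== PORT A =====
-- 'query[0]' / 'query[1]' raise IndexError on queries shorter than 2 (PySem.List.pyGet? = none)
-- and 'my_dict[i] += 1' raises KeyError when i is not a key of my_dict; Pre_solution excludes
-- exactly those inputs. The port uses Dict.modify (exact whenever the key is present) and
-- leaves the dict unchanged on a missing query entry (never reached inside Pre_solution).
def solutionQueryStep (d : PySem.Dict Int Int) (query : List Int) : PySem.Dict Int Int :=
  match PySem.List.pyGet? query 0, PySem.List.pyGet? query 1 with
  | some q0, some q1 =>
      (PySem.List.pyRange q0 (q1 + 1)).foldl (fun d i => d.modify i 0 (· + 1)) d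
  | _, _ => d

def solution (arr : List Int) (queries : List (List Int)) : List Int :=
  let myDict0 : PySem.Dict Int Int :=
    (PySem.List.pyRange 0 arr.length).foldl (fun d i => d.insert i 0) PySem.Dict.empty
  let myDict := queries.foldl solutionQueryStep myDict0
  (arr.foldl (fun (st : List Int × Int) i =>
      (st.1 ++ [i + myDict.getD st.2 0], st.2 + 1)) (([] : List Int), (0 : Int))).1

-- ===== PORT B =====
-- 'diff[i] += c': Python list indexing (negative indices wrap; out of range raises
-- IndexError = none, where the port leaves diff unchanged — Pre_solution-admitted runs
-- only ever reach in-range nonnegative indices).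
def incAt (xs : List Int) (i : Int) (c : Int) : List Int :=
  match PySem.List.pyIdx? xs.length i with
  | some k => xs.set k (xs.getD k 0 + c)
  | none => xs

def solutionAltStep (diff : List Int) (q : List Int) : List Int :=
  match PySem.List.pyGet? q 0, PySem.List.pyGet? q 1 with
  | some l, some r =>
      if l ≤ r then incAt (incAt diff l 1) (r + 1) (-1) else diff
  | _, _ => diff

def solution_alt (arr : List Int) (queries : List (List Int)) : List Int :=
  let n := arr.length
  let diff := queries.foldl solutionAltStep (List.replicate (n + 1) (0 : Int))
  ((arr.zip diff).foldl (fun (st : List Int × Int) xd =>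
      (st.1 ++ [xd.1 + (st.2 + xd.2)], st.2 + xd.2)) (([] : List Int), (0 : Int))).1

-- ===== PRECONDITION & SPEC =====
-- Exactly the inputs on which A returns: every query has at least two entries (else
-- IndexError) and, when its range [q0, q1] is nonempty, that range stays inside the
-- key set 0..len(arr)-1 of my_dict (else KeyError).
def Pre_solution (arr : List Int) (queries : List (List Int)) : Prop :=
  ∀ q ∈ queries, 2 ≤ q.length ∧
    (PySem.List.pyGetD q 0 0 ≤ PySem.List.pyGetD q 1 0 →
      0 ≤ PySem.List.pyGetD q 0 0 ∧ PySem.List.pyGetD q 1 0 < (arr.length : Int))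
instance (arr : List Int) (queries : List (List Int)) : Decidable (Pre_solution arr queries) := by unfold Pre_solution; infer_instance

def pvWitness_solution : List Int × List (List Int) := ([3, 2, 4, 1], [[0, 2], [1, 3], [2, 1]])

def Spec_solution (arr : List Int) (queries : List (List Int)) (out : List Int) : Prop := out = solution_alt arr queries
instance (arr : List Int) (queries : List (List Int)) (out : List Int) : Decidable (Spec_solution arr queries out) := by unfold Spec_solution; infer_instance

-- ===== CLAIM (what is proved, stated in full; the proofs are below) =====
def Claim_equal_solution : Prop := ∀ (arr : List Int) (queries : List (List Int)), Dom_solution arr queries → Pre_solution arr queries → Spec_solution arr queries (solution arr queries)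

-- ===== LEMMAS AND PROOFS =====

-- number of queries whose (present, nonempty) range [q0, q1] covers index j
def pvCnt (queries : List (List Int)) (j : Int) : Int :=
  (queries.map (fun q =>
    match PySem.List.pyGet? q 0, PySem.List.pyGet? q 1 with
    | some l, some r => if l ≤ j ∧ j ≤ r then (1 : Int) else 0
    | _, _ => 0)).sum

theorem nodup_pyRange_one (a b : Int) : (PySem.List.pyRange a b).Nodup := by
  unfold PySem.List.pyRange
  simp only [if_neg (by norm_num : (1:Int) ≠ 0)]
  refine List.Nodup.map ?_ (List.nodup_range)
  intro x y hxy
  simp only [one_mul, add_right_inj, Nat.cast_inj] at hxy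
  exact hxy

theorem count_pyRange_one (a b j : Int) :
    (PySem.List.pyRange a b).count j = if a ≤ j ∧ j < b then 1 else 0 := by
  by_cases h : a ≤ j ∧ j < b
  · rw [List.count_eq_one_of_mem (nodup_pyRange_one a b) (PySem.List.mem_pyRange_one.mpr h), if_pos h]
  · rw [List.count_eq_zero_of_not_mem (by rw [PySem.List.mem_pyRange_one]; exact h), if_neg h]

-- the initialisation loop 'my_dict[i] = 0' keeps every getD-at-0 lookup equal to 0
theorem getD_foldl_insert_zero (l : List Int) (d : PySem.Dict Int Int) (j : Int)
    (h : d.getD j 0 = 0) : (l.foldl (fun d i => d.insert i (0 : Int)) d).getD j 0 = 0 := by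
  induction l generalizing d with
  | nil => exact h
  | cons x xs ih =>
      refine ih _ ?_
      rw [PySem.Dict.getD_insert]
      split_ifs <;> [rfl; exact h]

-- A's query loop adds, at every key j, exactly the number of admitted ranges covering j
theorem getD_foldl_queryStep (queries : List (List Int)) (d : PySem.Dict Int Int) (j : Int) :
    (queries.foldl solutionQueryStep d).getD j 0 = d.getD j 0 + pvCnt queries j := by
  induction queries generalizing d with
  | nil => simp [pvCnt]
  | cons q qs ih =>
      rw [List.foldl_cons, ih]
      have hstep : (solutionQueryStep d q).getD j 0 = d.getD j 0 +
          (match PySem.List.pyGet? q 0, PySem.List.pyGet? q 1 with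
           | some l, some r => if l ≤ j ∧ j ≤ r then (1 : Int) else 0
           | _, _ => 0) := by
        unfold solutionQueryStep
        cases h0 : PySem.List.pyGet? q 0 with
        | none => simp
        | some q0 =>
            cases h1 : PySem.List.pyGet? q 1 with
            | none => simp
            | some q1 =>
                simp only [PySem.Dict.getD_foldl_modify_add_one, count_pyRange_one]
                have : (q0 ≤ j ∧ j < q1 + 1) ↔ (q0 ≤ j ∧ j ≤ q1) := by omega
                rw [if_congr this rfl rfl]
                split_ifs <;> simp
      rw [hstep]
      simp only [pvCnt, List.map_cons, List.sum_cons]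
      ring

-- A's output loop: append f(element, running index)
theorem foldl_append_idx (D : PySem.Dict Int Int) (xs : List Int) (acc : List Int) (t : Int) :
    (xs.foldl (fun (st : List Int × Int) i => (st.1 ++ [i + D.getD st.2 0], st.2 + 1)) (acc, t)).1
      = acc ++ xs.mapIdx (fun k x => x + D.getD (t + k) 0) := by
  induction xs generalizing acc t with
  | nil => simp
  | cons x xs ih =>
      rw [List.foldl_cons, ih, List.mapIdx_cons]
      have hfun : (fun (k : Nat) (x : Int) => x + D.getD (t + 1 + k) 0)
          = fun (k : Nat) (x : Int) => x + D.getD (t + (k + 1)) 0 := by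
        funext k x; congr 2; ring
      simp [hfun]

theorem length_incAt (xs : List Int) (i : Int) (c : Int) : (incAt xs i c).length = xs.length := by
  unfold incAt
  cases PySem.List.pyIdx? xs.length i <;> simp

theorem incAt_of_inRange (xs : List Int) (i : Int) (c : Int) (h0 : 0 ≤ i)
    (h1 : i < (xs.length : Int)) : incAt xs i c = xs.set i.toNat (xs.getD i.toNat 0 + c) := by
  unfold incAt PySem.List.pyIdx?
  rw [if_pos h0, if_pos h1]

theorem sum_take_setAdd (xs : List Int) (i m : Nat) (c : Int) (h : i < xs.length) :
    ((xs.set i (xs.getD i 0 + c)).take m).sum = (xs.take m).sum + if i < m then c else 0 := by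
  induction xs generalizing i m with
  | nil => simp at h
  | cons x xs ih =>
      cases i with
      | zero =>
          have h0 : (x :: xs).set 0 ((x :: xs).getD 0 0 + c) = (x + c) :: xs := by simp
          rw [h0]
          cases m with
          | zero => simp
          | succ m => simp [List.take_succ_cons]; ring
      | succ i =>
          have h0 : (x :: xs).set (i + 1) ((x :: xs).getD (i + 1) 0 + c)
              = x :: xs.set i (xs.getD i 0 + c) := by simp
          rw [h0]
          cases m with
          | zero => simp
          | succ m =>
              simp only [List.take_succ_cons, List.sum_cons,
                ih i m (by simpa using h)]
              split_ifs <;> omega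

theorem sum_take_incAt (xs : List Int) (i : Int) (m : Nat) (c : Int) (h0 : 0 ≤ i)
    (h : i < (xs.length : Int)) :
    ((incAt xs i c).take m).sum = (xs.take m).sum + if i.toNat < m then c else 0 := by
  rw [incAt_of_inRange xs i c h0 h]
  exact sum_take_setAdd xs i.toNat m c (by omega)

theorem length_altStep (diff : List Int) (q : List Int) :
    (solutionAltStep diff q).length = diff.length := by
  unfold solutionAltStep
  cases PySem.List.pyGet? q 0 <;> cases PySem.List.pyGet? q 1
  case some.some => simp only []; split_ifs <;> simp [length_incAt]
  all_goals rfl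

theorem length_foldl_altStep (queries : List (List Int)) (diff : List Int) :
    (queries.foldl solutionAltStep diff).length = diff.length := by
  induction queries generalizing diff with
  | nil => rfl
  | cons q qs ih =>
      rw [List.foldl_cons, ih, length_altStep]

-- B's difference array: the prefix sum up to index k accumulates pvCnt
theorem sum_take_foldl_altStep (n : Nat) (queries : List (List Int)) (diff : List Int)
    (hlen : diff.length = n + 1)
    (hq : ∀ q ∈ queries, 2 ≤ q.length ∧
      (PySem.List.pyGetD q 0 0 ≤ PySem.List.pyGetD q 1 0 →
        0 ≤ PySem.List.pyGetD q 0 0 ∧ PySem.List.pyGetD q 1 0 < (n : Int)))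
    (k : Nat) :
    ((queries.foldl solutionAltStep diff).take (k + 1)).sum
      = (diff.take (k + 1)).sum + pvCnt queries (k : Int) := by
  induction queries generalizing diff with
  | nil => simp [pvCnt]
  | cons q qs ih =>
      have hqh := hq q (List.mem_cons_self ..)
      rw [List.foldl_cons,
        ih _ (by rw [length_altStep, hlen])
          (fun q hmem => hq q (List.mem_cons_of_mem _ hmem))]
      have hstep : ((solutionAltStep diff q).take (k + 1)).sum = (diff.take (k + 1)).sum +
          (match PySem.List.pyGet? q 0, PySem.List.pyGet? q 1 with
           | some l, some r => if l ≤ (k : Int) ∧ (k : Int) ≤ r then (1 : Int) else 0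
           | _, _ => 0) := by
        unfold solutionAltStep
        cases h0 : PySem.List.pyGet? q 0 with
        | none => simp
        | some l =>
            cases h1 : PySem.List.pyGet? q 1 with
            | none => simp
            | some r =>
                have hl : PySem.List.pyGetD q 0 0 = l := by simp [PySem.List.pyGetD, h0]
                have hr : PySem.List.pyGetD q 1 0 = r := by simp [PySem.List.pyGetD, h1]
                simp only []
                by_cases hle : l ≤ r
                · have hbounds := hqh.2 (by rw [hl, hr]; exact hle)
                  rw [hl, hr] at hbounds
                  rw [if_pos hle]
                  rw [sum_take_incAt _ _ _ _ (by omega)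
                      (by rw [length_incAt, hlen]; push_cast; omega),
                    sum_take_incAt _ _ _ _ (by omega) (by rw [hlen]; push_cast; omega)]
                  split_ifs <;> omega
                · rw [if_neg hle, if_neg (by omega)]; ring
      rw [hstep]
      simp only [pvCnt, List.map_cons, List.sum_cons]
      ring

-- B's output loop over zip(arr, diff): running prefix sum of diff added to each element
theorem foldl_zip_prefix (xs ds acc : List Int) (run : Int) (h : xs.length ≤ ds.length) :
    ((xs.zip ds).foldl (fun (st : List Int × Int) xd =>
        (st.1 ++ [xd.1 + (st.2 + xd.2)], st.2 + xd.2)) (acc, run)).1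
      = acc ++ xs.mapIdx (fun k x => x + (run + (ds.take (k + 1)).sum)) := by
  induction xs generalizing ds acc run with
  | nil => simp
  | cons x xs ih =>
      cases ds with
      | nil => simp at h
      | cons d ds =>
          rw [List.zip_cons_cons, List.foldl_cons, ih _ _ _ (by simpa using h),
            List.mapIdx_cons]
          have hfun : (fun (k : Nat) (x : Int) => x + (run + d + (ds.take (k + 1)).sum))
              = fun (k : Nat) (x : Int) => x + (run + ((d :: ds).take (k + 1 + 1)).sum) := by
            funext k x
            rw [List.take_succ_cons, List.sum_cons]
            ring
          simp [hfun]

-- ===== VERDICT (by name: the statement is the Claim_ definition above) =====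
theorem solution_spec : Claim_equal_solution := by
  intro arr queries _hdom hpre
  unfold Spec_solution solution solution_alt
  simp only []
  rw [foldl_append_idx, foldl_zip_prefix _ _ _ _
      (by rw [length_foldl_altStep, List.length_replicate]; omega)]
  simp only [List.nil_append]
  apply List.ext_getElem (by simp)
  intro i h1 h2
  simp only [List.getElem_mapIdx]
  rw [getD_foldl_queryStep, getD_foldl_insert_zero _ _ _ (by simp [PySem.Dict.getD_empty]),
    sum_take_foldl_altStep arr.length queries _ (by simp) hpre]
  have hrep : ((List.replicate (arr.length + 1) (0 : Int)).take (i + 1)).sum = 0 := by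
    rw [List.take_replicate]
    simp
  rw [hrep]
  simp only [List.length_mapIdx] at h1
  ring_nf
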